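-- pv_equiv track=rewrite | github.com/filipeeteixeira/FEUP-FPRO | FPROPlay/Py08/FindTheTreasure.py | mapp
-- ===== SOURCE A (Python) =====
-- def mapp(pos,steps):
--     if steps==[]:
--         return pos
--     if steps[0]=='up':
--         return mapp((pos[0],pos[1]+1),steps[1:])
--     elif steps[0]=='down':
--         return mapp((pos[0],pos[1]-1),steps[1:])
--     elif steps[0]=='left':
--         return mapp((pos[0]-1,pos[1]),steps[1:])
--     elif steps[0]=='right':
--         return mapp((pos[0]+1,pos[1]),steps[1:])
-- ===== SOURCE B (Python) =====
-- _DELTA = {'up': (0, 1), 'down': (0, -1), 'left': (-1, 0), 'right': (1, 0)}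
--
-- def mapp(pos, steps):
--     if not steps:
--         return pos
--     dx = dy = 0
--     for s in steps:
--         d = _DELTA.get(s)
--         if d is None:
--             return None
--         dx += d[0]
--         dy += d[1]
--     return (pos[0] + dx, pos[1] + dy)
-- ===== Notes on version B (the rewrite author's own statement) =====
-- stated objective: alternative
-- what changed: Replaces the recursion that rebuilds the position pair and copies the tail of steps with steps[1:] at every level by a single iterative pass that sums the displacements and adds them to the start position once.
import Mathlib
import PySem

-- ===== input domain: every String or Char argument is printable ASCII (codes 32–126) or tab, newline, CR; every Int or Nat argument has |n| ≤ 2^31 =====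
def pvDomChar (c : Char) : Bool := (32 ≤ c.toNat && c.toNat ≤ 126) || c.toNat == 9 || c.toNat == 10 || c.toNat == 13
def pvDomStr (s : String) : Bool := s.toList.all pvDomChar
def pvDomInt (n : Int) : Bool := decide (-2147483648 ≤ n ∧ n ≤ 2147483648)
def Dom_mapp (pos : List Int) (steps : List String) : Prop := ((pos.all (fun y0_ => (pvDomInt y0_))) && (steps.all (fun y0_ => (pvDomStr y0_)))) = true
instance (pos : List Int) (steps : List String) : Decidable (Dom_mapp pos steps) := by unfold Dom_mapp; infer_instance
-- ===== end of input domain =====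

-- ===== PORT A =====
-- literal port of A: recursion on steps, rebuilding the 2-element position each step
def mapp (pos : List Int) (steps : List String) : Option (List Int) :=
  match steps with
  | [] => some pos
  | s :: rest =>
    if s = "up" then
      match PySem.List.pyGet? pos 0, PySem.List.pyGet? pos 1 with
      | some x, some y => mapp [x, y + 1] rest
      | _, _ => none
    else if s = "down" then
      match PySem.List.pyGet? pos 0, PySem.List.pyGet? pos 1 with
      | some x, some y => mapp [x, y - 1] rest
      | _, _ => none
    else if s = "left" then
      match PySem.List.pyGet? pos 0, PySem.List.pyGet? pos 1 with
      | some x, some y => mapp [x - 1, y] rest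
      | _, _ => none
    else if s = "right" then
      match PySem.List.pyGet? pos 0, PySem.List.pyGet? pos 1 with
      | some x, some y => mapp [x + 1, y] rest
      | _, _ => none
    else none

-- ===== PORT B =====
-- port of B: one pass (a fold) summing displacements, applied to the start position once
def mappDelta (s : String) : Option (Int × Int) :=
  if s = "up" then some (0, 1)
  else if s = "down" then some (0, -1)
  else if s = "left" then some (-1, 0)
  else if s = "right" then some (1, 0)
  else none

def mappStep (acc : Option (Int × Int)) (s : String) : Option (Int × Int) :=
  acc.bind fun p => (mappDelta s).map fun d => (p.1 + d.1, p.2 + d.2)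

def mapp_alt (pos : List Int) (steps : List String) : Option (List Int) :=
  if steps = [] then some pos
  else
    (steps.foldl mappStep (some (0, 0))).bind fun d =>
      (PySem.List.pyGet? pos 0).bind fun x =>
        (PySem.List.pyGet? pos 1).bind fun y =>
          some [x + d.1, y + d.2]

-- ===== PRECONDITION & SPEC =====

-- Pre_ excludes exactly the inputs on which A raises IndexError: pos has fewer than
-- 2 coordinates while the first step is a valid direction (so A indexes pos).
def Pre_mapp (pos : List Int) (steps : List String) : Prop :=
  ¬ (pos.length < 2 ∧ steps.headD "" ∈ ["up", "down", "left", "right"])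
instance (pos : List Int) (steps : List String) : Decidable (Pre_mapp pos steps) := by
  unfold Pre_mapp; infer_instance
def pvWitness_mapp : List Int × List String := ([0, 0], ["up", "right"])

def Spec_mapp (pos : List Int) (steps : List String) (out : Option (List Int)) : Prop := out = mapp_alt pos steps
instance (pos : List Int) (steps : List String) (out : Option (List Int)) : Decidable (Spec_mapp pos steps out) := by unfold Spec_mapp; infer_instance

-- ===== CLAIM (what is proved, stated in full; the proofs are below) =====
def Claim_equal_mapp : Prop := ∀ (pos : List Int) (steps : List String), Dom_mapp pos steps → Pre_mapp pos steps → Spec_mapp pos steps (mapp pos steps)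

-- ===== LEMMAS AND PROOFS =====

theorem mappStep_none (steps : List String) : steps.foldl mappStep none = none := by
  induction steps with
  | nil => rfl
  | cons s rest ih => simpa [mappStep] using ih

-- A on a 2-element position computes the B fold with accumulators dx, dy
theorem mapp_pair (steps : List String) (x y : Int) : ∀ dx dy : Int,
    mapp [x + dx, y + dy] steps =
      (steps.foldl mappStep (some (dx, dy))).bind fun d => some [x + d.1, y + d.2] := by
  induction steps with
  | nil => intro dx dy; simp [mapp]
  | cons s rest ih =>
    intro dx dy
    by_cases h1 : s = "up"
    · subst h1
      have hL : ("up" :: rest).foldl mappStep (some (dx, dy)) =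
          rest.foldl mappStep (some (dx, dy + 1)) := by
        simp [List.foldl, mappStep, mappDelta]
      have hA : mapp [x + dx, y + dy] ("up" :: rest) = mapp [x + dx, y + dy + 1] rest := by
        simp [mapp, PySem.List.pyGet?, PySem.List.pyIdx?]
      have h := ih dx (dy + 1)
      rw [show y + (dy + 1) = y + dy + 1 from by ring] at h
      rw [hA, hL, h]
    by_cases h2 : s = "down"
    · subst h2
      have hL : ("down" :: rest).foldl mappStep (some (dx, dy)) =
          rest.foldl mappStep (some (dx, dy + (-1))) := by
        simp [List.foldl, mappStep, mappDelta]
      have hA : mapp [x + dx, y + dy] ("down" :: rest) = mapp [x + dx, y + dy - 1] rest := by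
        simp [mapp, PySem.List.pyGet?, PySem.List.pyIdx?]
      have h := ih dx (dy + (-1))
      rw [show y + (dy + (-1)) = y + dy - 1 from by ring] at h
      rw [hA, hL, h]
    by_cases h3 : s = "left"
    · subst h3
      have hL : ("left" :: rest).foldl mappStep (some (dx, dy)) =
          rest.foldl mappStep (some (dx + (-1), dy)) := by
        simp [List.foldl, mappStep, mappDelta]
      have hA : mapp [x + dx, y + dy] ("left" :: rest) = mapp [x + dx - 1, y + dy] rest := by
        simp [mapp, PySem.List.pyGet?, PySem.List.pyIdx?]
      have h := ih (dx + (-1)) dy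
      rw [show x + (dx + (-1)) = x + dx - 1 from by ring] at h
      rw [hA, hL, h]
    by_cases h4 : s = "right"
    · subst h4
      have hL : ("right" :: rest).foldl mappStep (some (dx, dy)) =
          rest.foldl mappStep (some (dx + 1, dy)) := by
        simp [List.foldl, mappStep, mappDelta]
      have hA : mapp [x + dx, y + dy] ("right" :: rest) = mapp [x + dx + 1, y + dy] rest := by
        simp [mapp, PySem.List.pyGet?, PySem.List.pyIdx?]
      have h := ih (dx + 1) dy
      rw [show x + (dx + 1) = x + dx + 1 from by ring] at h
      rw [hA, hL, h]
    · have hL' : (s :: rest).foldl mappStep (some (dx, dy)) = none := by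
        simp [List.foldl, mappStep, mappDelta, h1, h2, h3, h4, mappStep_none]
      have hA : mapp [x + dx, y + dy] (s :: rest) = none := by
        simp [mapp, h1, h2, h3, h4]
      rw [hA, hL']
      rfl

theorem pyGet?_head2_0 (x y : Int) (tail : List Int) :
    PySem.List.pyGet? (x :: y :: tail) (0 : Int) = some x := by
  have h0 : ((0 : Int)) = ((0 : Nat) : Int) := by norm_num
  rw [h0, PySem.List.pyGet?_natCast]
  rfl

theorem pyGet?_head2_1 (x y : Int) (tail : List Int) :
    PySem.List.pyGet? (x :: y :: tail) (1 : Int) = some y := by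
  have h01 : ((1 : Int)) = ((1 : Nat) : Int) := by norm_num
  rw [h01, PySem.List.pyGet?_natCast]
  rfl

-- ===== VERDICT (by name: the statement is the Claim_ definition above) =====
theorem mapp_spec : Claim_equal_mapp := by
  intro pos steps _hdom hpre
  unfold Spec_mapp
  match steps with
  | [] => rfl
  | s :: rest =>
    by_cases hdir : s ∈ (["up", "down", "left", "right"] : List String)
    · -- first step valid: Pre forces pos to have at least 2 coordinates
      have hlen : ¬ pos.length < 2 := fun h => hpre ⟨h, by simpa using hdir⟩
      match pos with
      | [] => exact absurd (by simp) hlen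
      | [_] => exact absurd (by simp) hlen
      | x :: y :: tail =>
        have hget0 := pyGet?_head2_0 x y tail
        have hget1 := pyGet?_head2_1 x y tail
        fin_cases hdir
        · -- "up"
          have hA : mapp (x :: y :: tail) ("up" :: rest) = mapp [x, y + 1] rest := by
            simp [mapp, hget0, hget1]
          have hB : mapp_alt (x :: y :: tail) ("up" :: rest) =
              ((rest.foldl mappStep (some (0, 1))).bind fun d => some [x + d.1, y + d.2]) := by
            simp [mapp_alt, List.foldl, mappStep, mappDelta, hget0, hget1]
          have h := mapp_pair rest x y 0 1
          rw [show x + (0 : Int) = x from by ring] at h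
          rw [hA, hB, h]
        · -- "down"
          have hA : mapp (x :: y :: tail) ("down" :: rest) = mapp [x, y - 1] rest := by
            simp [mapp, hget0, hget1]
          have hB : mapp_alt (x :: y :: tail) ("down" :: rest) =
              ((rest.foldl mappStep (some (0, -1))).bind fun d => some [x + d.1, y + d.2]) := by
            simp [mapp_alt, List.foldl, mappStep, mappDelta, hget0, hget1]
          have h := mapp_pair rest x y 0 (-1)
          rw [show x + (0 : Int) = x from by ring,
              show y + (-1 : Int) = y - 1 from by ring] at h
          rw [hA, hB, h]
        · -- "left"
          have hA : mapp (x :: y :: tail) ("left" :: rest) = mapp [x - 1, y] rest := by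
            simp [mapp, hget0, hget1]
          have hB : mapp_alt (x :: y :: tail) ("left" :: rest) =
              ((rest.foldl mappStep (some (-1, 0))).bind fun d => some [x + d.1, y + d.2]) := by
            simp [mapp_alt, List.foldl, mappStep, mappDelta, hget0, hget1]
          have h := mapp_pair rest x y (-1) 0
          rw [show y + (0 : Int) = y from by ring,
              show x + (-1 : Int) = x - 1 from by ring] at h
          rw [hA, hB, h]
        · -- "right"
          have hA : mapp (x :: y :: tail) ("right" :: rest) = mapp [x + 1, y] rest := by
            simp [mapp, hget0, hget1]
          have hB : mapp_alt (x :: y :: tail) ("right" :: rest) =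
              ((rest.foldl mappStep (some (1, 0))).bind fun d => some [x + d.1, y + d.2]) := by
            simp [mapp_alt, List.foldl, mappStep, mappDelta, hget0, hget1]
          have h := mapp_pair rest x y 1 0
          rw [show y + (0 : Int) = y from by ring] at h
          rw [hA, hB, h]
    · -- first step invalid: both sides return none
      have h1 : s ≠ "up" := by intro h; exact hdir (by simp [h])
      have h2 : s ≠ "down" := by intro h; exact hdir (by simp [h])
      have h3 : s ≠ "left" := by intro h; exact hdir (by simp [h])
      have h4 : s ≠ "right" := by intro h; exact hdir (by simp [h])
      have hL : (s :: rest).foldl mappStep (some (0, 0)) = none := by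
        simp [List.foldl, mappStep, mappDelta, h1, h2, h3, h4, mappStep_none]
      simp [mapp, mapp_alt, hL, h1, h2, h3, h4]
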